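-- pv_equiv track=rewrite | github.com/Kwabenabassaw/feed-backend | app/services/generator.py | _mix_images_into_feed
-- ===== SOURCE A (Python) =====
-- from typing import List, Optional, Set, Tuple
--
-- def _mix_images_into_feed(
--
--     video_ids: List[str],
--     image_ids: List[str]
-- ) -> List[str]:
--     """
--     Mix image IDs into video feed at 3:1 ratio.
--
--     Pattern: video, video, video, IMAGE, video, video, video, IMAGE...
--     """
--     if not image_ids:
--         return video_ids
--
--     result = []
--     img_idx = 0
--
--     for i, vid_id in enumerate(video_ids):
--         result.append(vid_id)
--
--         # Insert an image after every 3 videos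
--         if (i + 1) % 3 == 0 and img_idx < len(image_ids):
--             result.append(image_ids[img_idx])
--             img_idx += 1
--
--     return result
-- ===== SOURCE B (Python) =====
-- def _mix_images_into_feed(video_ids, image_ids):
--     """Mix image IDs into video feed at 3:1 ratio (block-wise passes over groups of 3)."""
--     if not image_ids:
--         return video_ids
--     n = len(video_ids)
--     result = []
--     img_idx = 0
--     start = 0
--     while start < n:
--         result.extend(video_ids[start:start + 3])
--         # insert an image only after a complete group of three
--         if start + 3 <= n and img_idx < len(image_ids):
--             result.append(image_ids[img_idx])
--             img_idx += 1
--         start += 3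
--     return result
-- ===== Notes on version B (the rewrite author's own statement) =====
-- stated objective: alternative
-- what changed: Replaces the per-element enumerate loop with a modulo test by a block-wise while loop that slices one group of three videos at a time and appends an image only after a complete group.
import Mathlib
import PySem

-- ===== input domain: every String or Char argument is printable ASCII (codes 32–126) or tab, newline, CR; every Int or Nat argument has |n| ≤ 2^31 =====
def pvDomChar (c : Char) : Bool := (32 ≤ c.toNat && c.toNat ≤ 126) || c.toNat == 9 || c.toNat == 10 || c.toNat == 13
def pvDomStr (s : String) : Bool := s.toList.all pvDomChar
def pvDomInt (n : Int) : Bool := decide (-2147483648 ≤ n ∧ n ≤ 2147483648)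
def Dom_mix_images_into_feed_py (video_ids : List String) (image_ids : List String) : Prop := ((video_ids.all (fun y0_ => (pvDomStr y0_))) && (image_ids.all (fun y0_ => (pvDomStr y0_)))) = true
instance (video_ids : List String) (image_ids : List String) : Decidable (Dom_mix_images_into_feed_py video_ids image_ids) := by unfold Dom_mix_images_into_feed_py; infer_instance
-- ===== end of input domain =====

-- B replaces A's per-element enumerate loop (modulo test) by a block-wise while loop that
-- slices one group of three videos at a time; objective: alternative decomposition.

-- ===== PORT A =====
-- A's for-loop over enumerate(video_ids) with state (result, img_idx), as the obvious recursion
-- carrying the index i; image access is guarded by img_idx < len so getD is exact.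
def mixLoopA (image_ids : List String) : Nat → Nat → List String → List String → List String
  | _, _, result, [] => result
  | i, img_idx, result, vid :: rest =>
    let result := result ++ [vid]
    if (i + 1) % 3 = 0 ∧ img_idx < image_ids.length then
      mixLoopA image_ids (i + 1) (img_idx + 1) (result ++ [image_ids.getD img_idx ""]) rest
    else
      mixLoopA image_ids (i + 1) img_idx result rest

def mix_images_into_feed_py (video_ids : List String) (image_ids : List String) : List String :=
  if image_ids = [] then video_ids
  else mixLoopA image_ids 0 0 [] video_ids

-- ===== PORT B =====
-- Source B's while loop over start with state (result, img_idx), as the obvious recursion on start;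
-- video_ids[start:start+3] with natural bounds is exactly (drop start).take 3 (PySem.List.slice_natCast_add),
-- and image_ids[img_idx] is guarded by img_idx < len so getD is exact.
def mixLoopB (video_ids image_ids : List String) (n : Nat) (start img_idx : Nat)
    (result : List String) : List String :=
  if start < n then
    let result := result ++ (video_ids.drop start).take 3
    if start + 3 ≤ n ∧ img_idx < image_ids.length then
      mixLoopB video_ids image_ids n (start + 3) (img_idx + 1)
        (result ++ [image_ids.getD img_idx ""])
    else
      mixLoopB video_ids image_ids n (start + 3) img_idx result
  else result
termination_by n - start
decreasing_by all_goals omega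

def mix_images_into_feed_py_alt (video_ids : List String) (image_ids : List String) : List String :=
  if image_ids = [] then video_ids
  else mixLoopB video_ids image_ids video_ids.length 0 0 []

-- ===== PRECONDITION & SPEC =====
def Spec_mix_images_into_feed_py (video_ids : List String) (image_ids : List String) (out : List String) : Prop := out = mix_images_into_feed_py_alt video_ids image_ids
instance (video_ids : List String) (image_ids : List String) (out : List String) : Decidable (Spec_mix_images_into_feed_py video_ids image_ids out) := by unfold Spec_mix_images_into_feed_py; infer_instance

-- ===== CLAIM (what is proved, stated in full; the proofs are below) =====
def Claim_equal_mix_images_into_feed_py : Prop := ∀ (video_ids : List String) (image_ids : List String), Dom_mix_images_into_feed_py video_ids image_ids → Spec_mix_images_into_feed_py video_ids image_ids (mix_images_into_feed_py video_ids image_ids)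

-- ===== LEMMAS AND PROOFS =====

-- Proof-side reference function: both loops flatten to this block recursion.
def mixRef (videos : List String) (images : List String) : List String :=
  if images = [] ∨ videos.length < 3 then videos
  else videos.take 3 ++ [images.headD ""] ++ mixRef (videos.drop 3) (images.drop 1)
termination_by videos.length
decreasing_by simp_all; omega

lemma mixRef_short (videos images : List String) (h : images = [] ∨ videos.length < 3) :
    mixRef videos images = videos := by
  rw [mixRef, if_pos h]

lemma mixLoopA_noimg (image_ids : List String) (j : Nat) (hj : image_ids.length ≤ j) :
    ∀ (v : List String) (i : Nat) (acc : List String),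
      mixLoopA image_ids i j acc v = acc ++ v := by
  intro v
  induction v with
  | nil => intro i acc; simp [mixLoopA]
  | cons a rest ih =>
    intro i acc
    rw [mixLoopA, if_neg (by omega)]
    rw [ih]
    simp

lemma mixLoopA_eq_aux (image_ids : List String) :
    ∀ (n : Nat) (v acc : List String) (k j : Nat), v.length ≤ n →
      mixLoopA image_ids (3 * k) j acc v = acc ++ mixRef v (image_ids.drop j) := by
  intro n
  induction n with
  | zero =>
    intro v acc k j h
    have : v = [] := List.eq_nil_of_length_eq_zero (by omega)
    subst this
    rw [mixRef_short _ _ (Or.inr (by decide))]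
    simp [mixLoopA]
  | succ n ih =>
    intro v acc k j h
    match v with
    | [] =>
      rw [mixRef_short _ _ (Or.inr (by decide))]
      simp [mixLoopA]
    | [a] =>
      rw [mixLoopA, if_neg (by omega), mixLoopA]
      rw [mixRef_short _ _ (Or.inr (by simp))]
    | [a, b] =>
      rw [mixLoopA, if_neg (by omega), mixLoopA, if_neg (by omega), mixLoopA]
      rw [mixRef_short _ _ (Or.inr (by simp))]
      simp
    | a :: b :: c :: rest =>
      rw [mixLoopA, if_neg (by omega), mixLoopA, if_neg (by omega), mixLoopA]
      by_cases hj : j < image_ids.length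
      · rw [if_pos ⟨by omega, hj⟩]
        have h3 : (3 * k + 1) + 1 + 1 = 3 * (k + 1) := by omega
        rw [h3, ih rest _ (k + 1) (j + 1) (by simp at h ⊢; omega)]
        have hd : image_ids.drop j = image_ids.getD j "" :: image_ids.drop (j + 1) := by
          rw [List.getD_eq_getElem _ _ hj, List.drop_eq_getElem_cons hj]
        conv_rhs => rw [hd, mixRef]
        rw [if_neg (by push Not; exact ⟨by simp, by simp⟩)]
        simp
      · rw [if_neg (by omega)]
        rw [mixLoopA_noimg _ _ (by omega)]
        rw [List.drop_eq_nil_of_le (by omega), mixRef_short _ _ (Or.inl rfl)]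
        simp

lemma mixLoopB_noimg (video_ids image_ids : List String) (j : Nat)
    (hj : image_ids.length ≤ j) :
    ∀ (fuel start : Nat) (acc : List String), video_ids.length - start ≤ fuel →
      mixLoopB video_ids image_ids video_ids.length start j acc =
        acc ++ video_ids.drop start := by
  intro fuel
  induction fuel with
  | zero =>
    intro start acc h
    rw [mixLoopB, if_neg (by omega), List.drop_eq_nil_of_le (by omega)]
    simp
  | succ fuel ih =>
    intro start acc h
    by_cases hs : start < video_ids.length
    · rw [mixLoopB, if_pos hs, if_neg (by omega)]
      rw [ih (start + 3) _ (by omega)]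
      have : (video_ids.drop start).take 3 ++ video_ids.drop (start + 3) =
          video_ids.drop start := by
        have h1 : video_ids.drop (start + 3) = (video_ids.drop start).drop 3 := by
          rw [List.drop_drop]
        rw [h1, List.take_append_drop]
      simp [this]
    · rw [mixLoopB, if_neg hs, List.drop_eq_nil_of_le (by omega)]
      simp

lemma mixLoopB_eq_aux (video_ids image_ids : List String) :
    ∀ (fuel start j : Nat) (acc : List String), video_ids.length - start ≤ fuel →
      mixLoopB video_ids image_ids video_ids.length start j acc =
        acc ++ mixRef (video_ids.drop start) (image_ids.drop j) := by
  intro fuel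
  induction fuel with
  | zero =>
    intro start j acc h
    rw [mixLoopB, if_neg (by omega), List.drop_eq_nil_of_le (by omega)]
    rw [mixRef_short _ _ (Or.inr (by decide))]
    simp
  | succ fuel ih =>
    intro start j acc h
    by_cases hs : start < video_ids.length
    · rw [mixLoopB, if_pos hs]
      by_cases hc : start + 3 ≤ video_ids.length ∧ j < image_ids.length
      · rw [if_pos hc]
        rw [ih (start + 3) (j + 1) _ (by omega)]
        have hd : image_ids.drop j = image_ids.getD j "" :: image_ids.drop (j + 1) := by
          rw [List.getD_eq_getElem _ _ hc.2, List.drop_eq_getElem_cons hc.2]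
        conv_rhs => rw [hd, mixRef]
        rw [if_neg (by push Not; exact ⟨by simp, by simp; omega⟩)]
        have h1 : video_ids.drop (start + 3) = (video_ids.drop start).drop 3 := by
          rw [List.drop_drop]
        rw [h1]
        simp
      · rw [if_neg hc]
        rcases Decidable.not_and_iff_not_or_not.mp hc with hn | hj
        · -- incomplete last group: the loop ends after this chunk
          have hlen : (video_ids.drop start).length < 3 := by simp; omega
          rw [mixLoopB, if_neg (by omega)]
          rw [mixRef_short _ _ (Or.inr hlen)]
          rw [List.take_of_length_le (by omega)]
        · -- images exhausted: remaining chunks are copied unchanged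
          rw [mixLoopB_noimg _ _ _ (by omega) fuel (start + 3) _ (by omega)]
          rw [show image_ids.drop j = [] from List.drop_eq_nil_of_le (by omega)]
          rw [mixRef_short _ _ (Or.inl rfl)]
          rw [List.append_assoc, show video_ids.drop (start + 3) = (video_ids.drop start).drop 3 from by rw [List.drop_drop], List.take_append_drop]
    · rw [mixLoopB, if_neg hs, List.drop_eq_nil_of_le (by omega)]
      rw [mixRef_short _ _ (Or.inr (by decide))]
      simp

-- ===== VERDICT (by name: the statement is the Claim_ definition above) =====
theorem mix_images_into_feed_py_spec : Claim_equal_mix_images_into_feed_py := by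
  intro video_ids image_ids _
  unfold Spec_mix_images_into_feed_py mix_images_into_feed_py mix_images_into_feed_py_alt
  by_cases h : image_ids = []
  · simp [h]
  · rw [if_neg h, if_neg h]
    have hA := mixLoopA_eq_aux image_ids video_ids.length video_ids [] 0 0 (le_refl _)
    have hB := mixLoopB_eq_aux video_ids image_ids video_ids.length 0 0 [] (by omega)
    simp at hA hB
    rw [hA, hB]
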